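-- pv_equiv track=rewrite | github.com/endomorphosis/lift_coding | src/handsfree/handlers/pr_summary.py | _summarize_checks
-- ===== SOURCE A (Python) =====
-- from typing import Any
--
-- def _summarize_checks(checks: list[dict[str, Any]]) -> dict[str, Any]:
--     """Summarize check runs."""
--     total = len(checks)
--     passed = sum(1 for c in checks if c.get("conclusion") == "success")
--     failed = sum(1 for c in checks if c.get("conclusion") == "failure")
--     pending = sum(1 for c in checks if c.get("status") != "completed")
--
--     return {
--         "total": total,
--         "passed": passed,
--         "failed": failed,
--         "pending": pending,
--     }
-- ===== SOURCE B (Python) =====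
-- from typing import Any
--
-- def _summarize_checks(checks: list[dict[str, Any]]) -> dict[str, Any]:
--     """Summarize check runs in a single pass with three counters."""
--     passed = failed = pending = 0
--     for c in checks:
--         concl = c.get("conclusion")
--         if concl == "success":
--             passed += 1
--         elif concl == "failure":
--             failed += 1
--         if c.get("status") != "completed":
--             pending += 1
--     return {
--         "total": len(checks),
--         "passed": passed,
--         "failed": failed,
--         "pending": pending,
--     }
-- ===== Notes on version B (the rewrite author's own statement) =====
-- stated objective: alternative
-- what changed: Three separate generator-sum passes over checks are fused into a single for-loop maintaining three integer counters (with an elif since success/failure conclusions are mutually exclusive).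
import Mathlib
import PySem

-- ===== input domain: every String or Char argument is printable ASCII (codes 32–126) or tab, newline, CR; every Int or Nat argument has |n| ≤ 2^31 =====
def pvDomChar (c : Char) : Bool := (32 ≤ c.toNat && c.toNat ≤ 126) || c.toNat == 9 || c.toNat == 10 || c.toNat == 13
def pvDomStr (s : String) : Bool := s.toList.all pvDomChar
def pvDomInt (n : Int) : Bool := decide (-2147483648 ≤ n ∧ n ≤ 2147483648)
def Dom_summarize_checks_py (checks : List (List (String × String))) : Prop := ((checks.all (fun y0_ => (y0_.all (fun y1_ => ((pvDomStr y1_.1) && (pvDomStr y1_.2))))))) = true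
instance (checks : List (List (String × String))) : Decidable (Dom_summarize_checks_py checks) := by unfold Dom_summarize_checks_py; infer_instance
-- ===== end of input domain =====

-- B fuses A's three generator-sum passes into one loop with three counters (objective: alternative single-pass decomposition).

-- dict.get(k): first-match lookup in the association list (shared primitive for both ports)
def pvGet : List (String × String) → String → Option String
  | [], _ => none
  | (k, v) :: rest, x => if k == x then some v else pvGet rest x

-- ===== PORT A =====
def summarize_checks_py (checks : List (List (String × String))) : List (String × Int) :=
  let total : Int := checks.length
  let passed : Int := checks.foldl (fun acc c => if pvGet c "conclusion" == some "success" then acc + 1 else acc) 0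
  let failed : Int := checks.foldl (fun acc c => if pvGet c "conclusion" == some "failure" then acc + 1 else acc) 0
  let pending : Int := checks.foldl (fun acc c => if pvGet c "status" != some "completed" then acc + 1 else acc) 0
  [("total", total), ("passed", passed), ("failed", failed), ("pending", pending)]

-- ===== PORT B =====
def pvBStep (st : Int × Int × Int) (c : List (String × String)) : Int × Int × Int :=
  let concl := pvGet c "conclusion"
  let st1 :=
    if concl == some "success" then (st.1 + 1, st.2.1, st.2.2)
    else if concl == some "failure" then (st.1, st.2.1 + 1, st.2.2)
    else st
  if pvGet c "status" != some "completed" then (st1.1, st1.2.1, st1.2.2 + 1) else st1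

def summarize_checks_py_alt (checks : List (List (String × String))) : List (String × Int) :=
  let st := checks.foldl pvBStep (0, 0, 0)
  [("total", (checks.length : Int)), ("passed", st.1), ("failed", st.2.1), ("pending", st.2.2)]

-- ===== PRECONDITION & SPEC =====
def Spec_summarize_checks_py (checks : List (List (String × String))) (out : List (String × Int)) : Prop := out = summarize_checks_py_alt checks
instance (checks : List (List (String × String))) (out : List (String × Int)) : Decidable (Spec_summarize_checks_py checks out) := by unfold Spec_summarize_checks_py; infer_instance

-- ===== CLAIM (what is proved, stated in full; the proofs are below) =====
def Claim_equal_summarize_checks_py : Prop := ∀ (checks : List (List (String × String))), Dom_summarize_checks_py checks → Spec_summarize_checks_py checks (summarize_checks_py checks)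

-- ===== LEMMAS AND PROOFS =====

theorem pvBStep_fold (checks : List (List (String × String))) : ∀ (p f pe : Int),
    checks.foldl pvBStep (p, f, pe) =
      (checks.foldl (fun acc c => if pvGet c "conclusion" == some "success" then acc + 1 else acc) p,
       checks.foldl (fun acc c => if pvGet c "conclusion" == some "failure" then acc + 1 else acc) f,
       checks.foldl (fun acc c => if pvGet c "status" != some "completed" then acc + 1 else acc) pe) := by
  induction checks with
  | nil => intro p f pe; rfl
  | cons c rest ih =>
    intro p f pe
    simp only [List.foldl_cons, pvBStep]
    by_cases hst : pvGet c "status" = some "completed" <;>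
      by_cases hs : pvGet c "conclusion" = some "success"
    · simp [hst, hs, ih]
    · by_cases hf : pvGet c "conclusion" = some "failure" <;> simp [hst, hs, hf, ih]
    · simp [hst, hs, ih]
    · by_cases hf : pvGet c "conclusion" = some "failure" <;> simp [hst, hs, hf, ih]

theorem summarize_checks_py_spec : Claim_equal_summarize_checks_py := by
  intro checks _
  unfold Spec_summarize_checks_py summarize_checks_py summarize_checks_py_alt
  simp [pvBStep_fold]
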